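-- pv_equiv track=rewrite | github.com/KaaraOpCode/SIC-AI | NLP webpos deep learning from tokenization.py | extract_rule_based
-- ===== SOURCE A (Python) =====
-- from collections import Counter, defaultdict
--
-- PRODUCTS = ["CocaCola", "Fanta", "Sprite", "Pepsi"]
--
-- LOW_STOCK_THRESHOLD = 5
--
-- def extract_rule_based(tokenized_logs):
--     product_sales = defaultdict(int)
--     low_stock_alerts = []
--     feedback_texts = []
--
--     for tokens in tokenized_logs:
--         log_lower = [t.lower() for t in tokens]
--         products_in_log = [p for p in PRODUCTS if p.lower() in log_lower]
--         numbers = [int(t) for t in tokens if t.isdigit()]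
--
--         for product in products_in_log:
--             if "sold" in log_lower and numbers:
--                 product_sales[product] += numbers[0]
--
--         if "stock" in log_lower and any(n < LOW_STOCK_THRESHOLD for n in numbers):
--             low_stock_alerts.append(" ".join(tokens))
--
--         if any(word in log_lower for word in ["complained", "excellent", "late", "expired"]):
--             feedback_texts.append(" ".join(tokens))
--
--     return product_sales, low_stock_alerts, feedback_texts
-- ===== SOURCE B (Python) =====
-- from collections import defaultdict
--
-- PRODUCTS = ["CocaCola", "Fanta", "Sprite", "Pepsi"]
--
-- LOW_STOCK_THRESHOLD = 5
--
-- def _numbers(tokens):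
--     return [int(t) for t in tokens if t.isdigit()]
--
-- def _sales_pass(tokenized_logs):
--     sales = defaultdict(int)
--     for tokens in tokenized_logs:
--         log_lower = [t.lower() for t in tokens]
--         numbers = _numbers(tokens)
--         if "sold" in log_lower and numbers:
--             for product in PRODUCTS:
--                 if product.lower() in log_lower:
--                     sales[product] += numbers[0]
--     return sales
--
-- def _stock_pass(tokenized_logs):
--     return [" ".join(tokens) for tokens in tokenized_logs
--             if "stock" in [t.lower() for t in tokens]
--             and any(n < LOW_STOCK_THRESHOLD for n in _numbers(tokens))]
--
-- def _feedback_pass(tokenized_logs):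
--     keywords = {"complained", "excellent", "late", "expired"}
--     return [" ".join(tokens) for tokens in tokenized_logs
--             if not keywords.isdisjoint(t.lower() for t in tokens)]
--
-- def extract_rule_based(tokenized_logs):
--     return _sales_pass(tokenized_logs), _stock_pass(tokenized_logs), _feedback_pass(tokenized_logs)
-- ===== Notes on version B (the rewrite author's own statement) =====
-- stated objective: alternative
-- what changed: A's single loop threading a (sales, alerts, feedback) accumulator triple is split into three independent passes over the logs: a fold building the sales defaultdict with the sold/numbers test hoisted out of the product loop, and two list comprehensions (filter-map style) for stock alerts and feedback, the latter testing tokens against a keyword set instead of scanning keywords against the log.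
import Mathlib
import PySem

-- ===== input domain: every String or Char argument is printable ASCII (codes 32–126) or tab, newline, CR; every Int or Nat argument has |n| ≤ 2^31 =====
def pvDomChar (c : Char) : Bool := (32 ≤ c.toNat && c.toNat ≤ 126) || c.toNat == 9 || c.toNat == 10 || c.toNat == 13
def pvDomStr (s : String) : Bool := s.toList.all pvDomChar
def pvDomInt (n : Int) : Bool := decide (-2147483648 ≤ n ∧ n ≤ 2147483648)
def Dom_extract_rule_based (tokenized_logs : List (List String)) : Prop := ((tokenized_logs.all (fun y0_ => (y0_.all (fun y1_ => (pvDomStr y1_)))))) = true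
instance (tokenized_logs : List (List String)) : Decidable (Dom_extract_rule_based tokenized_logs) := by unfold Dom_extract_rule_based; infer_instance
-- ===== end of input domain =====

-- B restructures A's single accumulator loop into three independent passes (objective: simpler/alternative, same cost).
-- ===== PORT A =====
def pvPRODUCTS : List String := ["CocaCola", "Fanta", "Sprite", "Pepsi"]

-- numbers = [int(t) for t in tokens if t.isdigit()]; on ASCII-digit strings int() always succeeds, so getD 0 is never taken
def pvNumbers (tokens : List String) : List Int :=
  (tokens.filter PySem.Str.strIsdigit).map (fun t => (PySem.Int.ofStr? t).getD 0)

def extract_rule_based (tokenized_logs : List (List String)) : (List (String × Int)) × List String × List String :=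
  let st := tokenized_logs.foldl
    (fun (st : PySem.Dict String Int × List String × List String) tokens =>
      let log_lower := tokens.map PySem.Str.lower
      let products_in_log := pvPRODUCTS.filter (fun p => log_lower.contains (PySem.Str.lower p))
      let numbers := pvNumbers tokens
      let sales := products_in_log.foldl
        (fun d product =>
          if log_lower.contains "sold" && !numbers.isEmpty
          then d.modify product 0 (· + (PySem.List.pyGet? numbers 0).getD 0)   -- numbers[0]; guarded nonempty
          else d) st.1
      let alerts := if log_lower.contains "stock" && numbers.any (fun n => n < 5)
        then st.2.1 ++ [PySem.Str.join " " tokens] else st.2.1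
      let fb := if ["complained", "excellent", "late", "expired"].any (fun w => log_lower.contains w)
        then st.2.2 ++ [PySem.Str.join " " tokens] else st.2.2
      (sales, alerts, fb))
    (PySem.Dict.empty, [], [])
  (st.1.items, st.2.1, st.2.2)

-- ===== PORT B =====
def pvSalesPass (tokenized_logs : List (List String)) : PySem.Dict String Int :=
  tokenized_logs.foldl
    (fun d tokens =>
      let log_lower := tokens.map PySem.Str.lower
      let numbers := pvNumbers tokens
      if log_lower.contains "sold" && !numbers.isEmpty
      then pvPRODUCTS.foldl
        (fun d product =>
          if log_lower.contains (PySem.Str.lower product)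
          then d.modify product 0 (· + (PySem.List.pyGet? numbers 0).getD 0)
          else d) d
      else d)
    PySem.Dict.empty

def pvStockPass (tokenized_logs : List (List String)) : List String :=
  tokenized_logs.filterMap
    (fun tokens =>
      if (tokens.map PySem.Str.lower).contains "stock" && (pvNumbers tokens).any (fun n => n < 5)
      then some (PySem.Str.join " " tokens) else none)

def pvKeywords : List String := PySem.Set.ofList ["complained", "excellent", "late", "expired"]

def pvFeedbackPass (tokenized_logs : List (List String)) : List String :=
  tokenized_logs.filterMap
    (fun tokens =>
      if (tokens.map PySem.Str.lower).any (fun t => pvKeywords.contains t)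
      then some (PySem.Str.join " " tokens) else none)

def extract_rule_based_alt (tokenized_logs : List (List String)) : (List (String × Int)) × List String × List String :=
  ((pvSalesPass tokenized_logs).items, pvStockPass tokenized_logs, pvFeedbackPass tokenized_logs)

-- ===== PRECONDITION & SPEC =====
def Spec_extract_rule_based (tokenized_logs : List (List String)) (out : (List (String × Int)) × List String × List String) : Prop := out = extract_rule_based_alt tokenized_logs
instance (tokenized_logs : List (List String)) (out : (List (String × Int)) × List String × List String) : Decidable (Spec_extract_rule_based tokenized_logs out) := by unfold Spec_extract_rule_based; infer_instance

-- ===== CLAIM (what is proved, stated in full; the proofs are below) =====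
def Claim_equal_extract_rule_based : Prop := ∀ (tokenized_logs : List (List String)), Dom_extract_rule_based tokenized_logs → Spec_extract_rule_based tokenized_logs (extract_rule_based tokenized_logs)

-- ===== LEMMAS AND PROOFS =====

-- A's inner product loop re-tests the (product-independent) 'sold'/numbers condition each iteration; B hoists it out.
theorem pvSalesStep_eq (log_lower : List String) (numbers : List Int) (d : PySem.Dict String Int) :
    (pvPRODUCTS.filter (fun p => log_lower.contains (PySem.Str.lower p))).foldl
      (fun d product =>
        if log_lower.contains "sold" && !numbers.isEmpty
        then d.modify product 0 (· + (PySem.List.pyGet? numbers 0).getD 0)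
        else d) d
    = if log_lower.contains "sold" && !numbers.isEmpty
      then pvPRODUCTS.foldl
        (fun d product =>
          if log_lower.contains (PySem.Str.lower product)
          then d.modify product 0 (· + (PySem.List.pyGet? numbers 0).getD 0)
          else d) d
      else d := by
  by_cases h : (log_lower.contains "sold" && !numbers.isEmpty) = true
  · rw [if_pos h]
    induction pvPRODUCTS generalizing d with
    | nil => rfl
    | cons p ps ih =>
      rw [List.filter_cons, List.foldl_cons]
      by_cases hp : log_lower.contains (PySem.Str.lower p) = true
      · rw [if_pos hp, if_pos hp, List.foldl_cons, if_pos h, ih]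
      · rw [if_neg hp, if_neg hp, ih]
  · rw [if_neg h]
    induction pvPRODUCTS generalizing d with
    | nil => rfl
    | cons p ps ih =>
      rw [List.filter_cons]
      by_cases hp : log_lower.contains (PySem.Str.lower p) = true
      · rw [if_pos hp, List.foldl_cons, if_neg h, ih]
      · rw [if_neg hp, ih]

-- A tests the keywords against log_lower keyword-first; B token-first — both decide 'some keyword occurs'.
theorem pvFeedbackCond_eq (log_lower : List String) :
    (["complained", "excellent", "late", "expired"].any (fun w => log_lower.contains w))
    = log_lower.any (fun t => pvKeywords.contains t) := by
  have : pvKeywords = ["complained", "excellent", "late", "expired"] := by decide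
  rw [this]
  by_cases h : ∃ w ∈ (["complained", "excellent", "late", "expired"] : List String), w ∈ log_lower
  · obtain ⟨w, hw, hm⟩ := h
    have h1 : (["complained", "excellent", "late", "expired"] : List String).any (fun w => log_lower.contains w) = true := by
      simp only [List.any_eq_true, List.contains_iff_mem]; exact ⟨w, hw, hm⟩
    have h2 : log_lower.any (fun t => (["complained", "excellent", "late", "expired"] : List String).contains t) = true := by
      simp only [List.any_eq_true, List.contains_iff_mem]; exact ⟨w, hm, hw⟩
    rw [h1, h2]
  · have h1 : (["complained", "excellent", "late", "expired"] : List String).any (fun w => log_lower.contains w) = false := by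
      simp only [List.any_eq_false, List.contains_iff_mem]
      intro w hw hm; exact h ⟨w, hw, hm⟩
    have h2 : log_lower.any (fun t => (["complained", "excellent", "late", "expired"] : List String).contains t) = false := by
      simp only [List.any_eq_false, List.contains_iff_mem]
      intro t ht hm; exact h ⟨t, hm, ht⟩
    rw [h1, h2]

-- The combined fold splits into the three passes.
theorem pvSplit (logs : List (List String)) (d : PySem.Dict String Int) (al fb : List String) :
    logs.foldl
      (fun (st : PySem.Dict String Int × List String × List String) tokens =>
        let log_lower := tokens.map PySem.Str.lower
        let products_in_log := pvPRODUCTS.filter (fun p => log_lower.contains (PySem.Str.lower p))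
        let numbers := pvNumbers tokens
        let sales := products_in_log.foldl
          (fun d product =>
            if log_lower.contains "sold" && !numbers.isEmpty
            then d.modify product 0 (· + (PySem.List.pyGet? numbers 0).getD 0)
            else d) st.1
        let alerts := if log_lower.contains "stock" && numbers.any (fun n => n < 5)
          then st.2.1 ++ [PySem.Str.join " " tokens] else st.2.1
        let fb' := if ["complained", "excellent", "late", "expired"].any (fun w => log_lower.contains w)
          then st.2.2 ++ [PySem.Str.join " " tokens] else st.2.2
        (sales, alerts, fb'))
      (d, al, fb)
    = (logs.foldl
        (fun d tokens =>
          let log_lower := tokens.map PySem.Str.lower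
          let numbers := pvNumbers tokens
          if log_lower.contains "sold" && !numbers.isEmpty
          then pvPRODUCTS.foldl
            (fun d product =>
              if log_lower.contains (PySem.Str.lower product)
              then d.modify product 0 (· + (PySem.List.pyGet? numbers 0).getD 0)
              else d) d
          else d) d,
       al ++ pvStockPass logs, fb ++ pvFeedbackPass logs) := by
  induction logs generalizing d al fb with
  | nil => simp [pvStockPass, pvFeedbackPass]
  | cons tokens rest ih =>
    simp only [List.foldl_cons]
    rw [ih]
    simp only [pvStockPass, pvFeedbackPass, List.filterMap_cons]
    rw [pvSalesStep_eq, pvFeedbackCond_eq]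
    cases h1 : ((tokens.map PySem.Str.lower).contains "stock" && (pvNumbers tokens).any (fun n => n < 5)) <;>
      cases h2 : ((tokens.map PySem.Str.lower).any (fun t => pvKeywords.contains t)) <;>
        simp

-- ===== VERDICT (by name: the statement is the Claim_ definition above) =====
theorem extract_rule_based_spec : Claim_equal_extract_rule_based := by
  intro logs _
  show _ = _
  unfold extract_rule_based extract_rule_based_alt pvSalesPass
  rw [pvSplit]
  rfl
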